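-- pv_equiv track=rewrite | github.com/precious112/Argus | packages/agent/src/argus_agent/storage/timescaledb_metrics.py | _rewrite_placeholders
-- ===== SOURCE A (Python) =====
-- from typing import Any
--
-- def _rewrite_placeholders(sql: str, params: list[Any] | None) -> tuple[str, list[Any] | None]:
--     """Rewrite ``?`` positional placeholders to ``$1, $2, ...`` for asyncpg."""
--     if params is None:
--         return sql, None
--     idx = 0
--     parts: list[str] = []
--     i = 0
--     while i < len(sql):
--         if sql[i] == "?" and not _in_string(sql, i):
--             idx += 1
--             parts.append(f"${idx}")
--         else:
--             parts.append(sql[i])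
--         i += 1
--     return "".join(parts), params
--
-- def _in_string(sql: str, pos: int) -> bool:
--     """Check whether position *pos* is inside a single-quoted string literal."""
--     count = 0
--     for i in range(pos):
--         if sql[i] == "'" and (i == 0 or sql[i - 1] != "\\"):
--             count += 1
--     return count % 2 == 1
-- ===== SOURCE B (Python) =====
-- def _rewrite_placeholders(sql, params):
--     """Rewrite ``?`` positional placeholders to ``$1, $2, ...`` for asyncpg."""
--     if params is None:
--         return sql, None
--     idx = 0
--     out = []
--     in_str = False
--     prev = None
--     for ch in sql:
--         if ch == "?" and not in_str:
--             idx += 1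
--             out.append(f"${idx}")
--         else:
--             out.append(ch)
--         if ch == "'" and prev != "\\":
--             in_str = not in_str
--         prev = ch
--     return "".join(out), params
-- ===== Notes on version B (the rewrite author's own statement) =====
-- stated objective: faster
-- what changed: Replaced the per-character rescan of the whole prefix (_in_string counts quotes from position 0 for every character) by a single pass that carries the in-string quote parity and the previous character as running state.
import Mathlib
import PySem

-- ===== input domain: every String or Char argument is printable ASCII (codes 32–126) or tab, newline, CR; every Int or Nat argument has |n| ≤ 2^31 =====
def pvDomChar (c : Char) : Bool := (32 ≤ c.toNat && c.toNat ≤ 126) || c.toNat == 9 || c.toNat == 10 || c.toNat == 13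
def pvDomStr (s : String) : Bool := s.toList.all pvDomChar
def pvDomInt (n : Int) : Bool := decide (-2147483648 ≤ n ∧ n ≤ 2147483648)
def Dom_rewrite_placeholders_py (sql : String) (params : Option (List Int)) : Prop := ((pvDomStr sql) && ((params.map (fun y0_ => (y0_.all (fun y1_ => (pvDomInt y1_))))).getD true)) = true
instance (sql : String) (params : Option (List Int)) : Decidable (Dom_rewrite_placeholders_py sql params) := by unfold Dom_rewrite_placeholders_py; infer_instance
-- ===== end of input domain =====

-- Port of A rescans the whole prefix at each position (quadratic, as in the Python);
-- port of B makes a single pass carrying the quote parity and the previous character.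

-- ===== PORT A =====
-- _in_string(sql, pos): count unescaped single quotes in sql[:pos], odd ⇒ inside a string
def inStringA (s : List Char) (pos : Nat) : Bool :=
  ((List.range pos).foldl
    (fun count i =>
      if s.getD i ' ' = '\'' ∧ (i = 0 ∨ s.getD (i - 1) ' ' ≠ '\\') then count + 1 else count)
    0) % 2 == 1

-- the while-loop of _rewrite_placeholders, recursion on the index i
def loopA (s : List Char) (i : Nat) (idx : Nat) (parts : List String) : Nat × List String :=
  if _h : i < s.length then
    if s.getD i ' ' = '?' ∧ inStringA s i = false then
      loopA s (i + 1) (idx + 1) (parts ++ ["$" ++ PySem.Int.toStr (idx + 1)])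
    else
      loopA s (i + 1) idx (parts ++ [String.ofList [s.getD i ' ']])
  else (idx, parts)
termination_by s.length - i

def rewrite_placeholders_py (sql : String) (params : Option (List Int)) : String × Option (List Int) :=
  match params with
  | none => (sql, none)
  | some ps =>
    let parts := (loopA sql.toList 0 0 []).2
    (PySem.Str.join "" parts, some ps)

-- ===== PORT B =====
-- one pass: state = (idx, out, in_str, prev)
def loopB : List Char → Nat → List String → Bool → Option Char → Nat × List String
  | [], idx, out, _, _ => (idx, out)
  | ch :: cs, idx, out, instr, prev =>
    let st :=
      if ch = '?' ∧ instr = false then (idx + 1, out ++ ["$" ++ PySem.Int.toStr (idx + 1)])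
      else (idx, out ++ [String.ofList [ch]])
    loopB cs st.1 st.2 (if ch = '\'' ∧ prev ≠ some '\\' then !instr else instr) (some ch)

def rewrite_placeholders_py_alt (sql : String) (params : Option (List Int)) : String × Option (List Int) :=
  match params with
  | none => (sql, none)
  | some ps =>
    let out := (loopB sql.toList 0 [] false none).2
    (PySem.Str.join "" out, some ps)

-- ===== PRECONDITION & SPEC =====
def Spec_rewrite_placeholders_py (sql : String) (params : Option (List Int)) (out : String × Option (List Int)) : Prop := out = rewrite_placeholders_py_alt sql params
instance (sql : String) (params : Option (List Int)) (out : String × Option (List Int)) : Decidable (Spec_rewrite_placeholders_py sql params out) := by unfold Spec_rewrite_placeholders_py; infer_instance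

-- ===== CLAIM (what is proved, stated in full; the proofs are below) =====
def Claim_equal_rewrite_placeholders_py : Prop := ∀ (sql : String) (params : Option (List Int)), Dom_rewrite_placeholders_py sql params → Spec_rewrite_placeholders_py sql params (rewrite_placeholders_py sql params)

-- ===== LEMMAS AND PROOFS =====

theorem inStringA_zero (s : List Char) : inStringA s 0 = false := by
  simp [inStringA]

theorem parity_flip (c : Nat) : (((c + 1) % 2 == 1) : Bool) = !(c % 2 == 1) := by
  rcases Nat.mod_two_eq_zero_or_one c with h | h <;>
    simp [Nat.add_mod, h]

theorem inStringA_succ (s : List Char) (i : Nat) :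
    inStringA s (i + 1) =
      if s.getD i ' ' = '\'' ∧ (i = 0 ∨ s.getD (i - 1) ' ' ≠ '\\') then !inStringA s i
      else inStringA s i := by
  unfold inStringA
  rw [List.range_succ, List.foldl_append]
  simp only [List.foldl_cons, List.foldl_nil]
  split_ifs with h
  · simp [parity_flip]
  · simp

theorem prev_cond (s : List Char) (i : Nat) :
    ((if i = 0 then (none : Option Char) else some (s.getD (i - 1) ' ')) ≠ some '\\') ↔
      (i = 0 ∨ s.getD (i - 1) ' ' ≠ '\\') := by
  split_ifs with h <;> simp [h]

theorem loop_eq (k : Nat) : ∀ (s : List Char) (i idx : Nat) (parts : List String),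
    s.length - i = k →
    loopA s i idx parts =
      loopB (s.drop i) idx parts (inStringA s i)
        (if i = 0 then none else some (s.getD (i - 1) ' ')) := by
  induction k with
  | zero =>
    intro s i idx parts hk
    have hle : s.length ≤ i := by omega
    rw [loopA]
    simp [Nat.not_lt.mpr hle, List.drop_eq_nil_of_le hle, loopB]
  | succ k ih =>
    intro s i idx parts hk
    have hi : i < s.length := by omega
    have hdrop : s.drop i = s[i] :: s.drop (i + 1) := List.drop_eq_getElem_cons hi
    have hgd : s.getD i ' ' = s[i] := List.getD_eq_getElem s ' ' hi
    rw [loopA, dif_pos hi, hdrop]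
    rw [loopB]
    have hprev : (if i = 0 then (none : Option Char) else some (s.getD (i - 1) ' ')) ≠ some '\\'
        ↔ (i = 0 ∨ s.getD (i - 1) ' ' ≠ '\\') := prev_cond s i
    have hflip :
        (if s[i] = '\'' ∧ (if i = 0 then (none : Option Char) else some (s.getD (i - 1) ' ')) ≠ some '\\'
           then !inStringA s i else inStringA s i) = inStringA s (i + 1) := by
      rw [inStringA_succ, hgd]
      by_cases h1 : s[i] = '\''
      · by_cases h2 : (i = 0 ∨ s.getD (i - 1) ' ' ≠ '\\')
        · rw [if_pos ⟨h1, hprev.mpr h2⟩, if_pos ⟨h1, h2⟩]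
        · rw [if_neg (fun hc => h2 (hprev.mp hc.2)), if_neg (fun hc => h2 hc.2)]
      · rw [if_neg (fun hc => h1 hc.1), if_neg (fun hc => h1 hc.1)]
    have hnext : (if i + 1 = 0 then (none : Option Char) else some (s.getD (i + 1 - 1) ' ')) = some s[i] := by
      simp only [Nat.add_one_sub_one, if_neg (Nat.succ_ne_zero i)]
      exact congrArg some hgd
    by_cases hq : s[i] = '?' ∧ inStringA s i = false
    · rw [if_pos (hgd ▸ hq)]
      rw [ih s (i + 1) (idx + 1) (parts ++ ["$" ++ PySem.Int.toStr (idx + 1)]) (by omega)]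
      simp only [if_pos hq, hflip, hnext]
    · rw [if_neg (by rw [hgd]; exact hq)]
      rw [ih s (i + 1) idx (parts ++ [String.ofList [s.getD i ' ']]) (by omega)]
      simp only [if_neg hq, hflip, hnext, hgd]

-- ===== VERDICT (by name: the statement is the Claim_ definition above) =====
theorem rewrite_placeholders_py_spec : Claim_equal_rewrite_placeholders_py := by
  intro sql params _
  unfold Spec_rewrite_placeholders_py rewrite_placeholders_py rewrite_placeholders_py_alt
  cases params with
  | none => rfl
  | some ps =>
    have h := loop_eq (sql.toList.length) sql.toList 0 0 [] (by omega)
    simp only [List.drop_zero, inStringA_zero] at h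
    simp [h]
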